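-- pv_equiv track=rewrite | github.com/DNXie/resym_demo | aggregation/eval_utils.py | get_cluster_head
-- ===== SOURCE A (Python) =====
-- from typing import List, Dict, Union, Set
--
-- def get_cluster_head(all_var:List[str], gt_var_order:List[str]):
--     # all_var: [v2,v1,v3]
--     # gt_var_order: [v1, v2, v3, v4, v5 ...]
--     # return v1, 1
--     first_var = None
--     first_var_index = 10000
--     for var in all_var:
--         if var not in gt_var_order:
--             continue
--         tmp_var_index = gt_var_order.index(var)
--         if tmp_var_index < first_var_index:
--             first_var_index = tmp_var_index
--             first_var = var
--
--     return first_var, first_var_index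
-- ===== SOURCE B (Python) =====
-- def get_cluster_head(all_var, gt_var_order):
--     # A position can only win against the sentinel index 10000, so only the
--     # first 10000 entries of the ordering need to be scanned.
--     present = set(all_var)
--     for i, var in enumerate(gt_var_order[:10000]):
--         if var in present:
--             return var, i
--     return None, 10000
-- ===== Notes on version B (the rewrite author's own statement) =====
-- stated objective: faster
-- what changed: Instead of scanning each candidate and minimising its gt_var_order.index position (a full scan of gt_var_order per candidate), B builds a set of the candidates once and walks gt_var_order[:10000] left to right, returning the first ordered variable that is a candidate (positions >= 10000 can never beat A's sentinel index 10000, so the default (None, 10000) is preserved exactly).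
import Mathlib
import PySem

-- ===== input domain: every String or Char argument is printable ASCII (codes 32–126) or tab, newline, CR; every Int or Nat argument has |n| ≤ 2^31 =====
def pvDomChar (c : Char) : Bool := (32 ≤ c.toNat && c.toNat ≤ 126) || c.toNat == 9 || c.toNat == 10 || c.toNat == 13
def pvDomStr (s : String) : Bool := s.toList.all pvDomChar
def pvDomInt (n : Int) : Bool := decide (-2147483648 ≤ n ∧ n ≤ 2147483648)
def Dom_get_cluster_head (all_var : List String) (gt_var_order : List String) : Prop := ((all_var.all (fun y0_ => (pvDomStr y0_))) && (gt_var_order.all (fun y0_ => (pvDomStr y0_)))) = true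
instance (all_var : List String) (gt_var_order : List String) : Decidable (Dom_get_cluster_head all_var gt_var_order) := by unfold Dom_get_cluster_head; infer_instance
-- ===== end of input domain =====

-- B replaces A's scan-candidates-and-minimise-their-index loop (a full gt_var_order.index scan
-- per candidate) by a single left-to-right walk of gt_var_order[:10000] with a set of the
-- candidates (a position can only beat A's sentinel index 10000 if it is below 10000).

-- ===== PORT A =====
def aStep (gt_var_order : List String) (st : Option String × Int) (var : String) : Option String × Int :=
  if gt_var_order.contains var = false then st          -- "if var not in gt_var_order: continue"
  else
    match PySem.List.index? gt_var_order var with       -- tmp_var_index = gt_var_order.index(var)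
    | none => st                                        -- unreachable: var is in gt_var_order
    | some k => if (k : Int) < st.2 then (some var, (k : Int)) else st

def get_cluster_head (all_var : List String) (gt_var_order : List String) : Option String × Int :=
  all_var.foldl (aStep gt_var_order) (none, 10000)

-- ===== PORT B =====
def altGo (present : PySem.Set String) (gs : List String) (i : Int) : Option String × Int :=
  match gs with
  | [] => (none, 10000)
  | g :: rest => if PySem.Set.contains present g then (some g, i) else altGo present rest (i + 1)

def get_cluster_head_alt (all_var : List String) (gt_var_order : List String) : Option String × Int :=
  altGo (PySem.Set.ofList all_var) (PySem.List.slice gt_var_order none (some 10000)) 0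

-- ===== PRECONDITION & SPEC =====
def Spec_get_cluster_head (all_var : List String) (gt_var_order : List String) (out : Option String × Int) : Prop := out = get_cluster_head_alt all_var gt_var_order
instance (all_var : List String) (gt_var_order : List String) (out : Option String × Int) : Decidable (Spec_get_cluster_head all_var gt_var_order out) := by unfold Spec_get_cluster_head; infer_instance

-- ===== CLAIM (what is proved, stated in full; the proofs are below) =====
def Claim_equal_get_cluster_head : Prop := ∀ (all_var : List String) (gt_var_order : List String), Dom_get_cluster_head all_var gt_var_order → Spec_get_cluster_head all_var gt_var_order (get_cluster_head all_var gt_var_order)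

-- ===== LEMMAS AND PROOFS =====

-- minimisation of A's loop state, second component only
def minStep (gt : List String) (m : Int) (v : String) : Int :=
  match PySem.List.index? gt v with
  | none => m
  | some k => min m (k : Int)

def jmin (gt vars : List String) (j : Int) : Int := vars.foldl (minStep gt) j

theorem minStep_le (gt : List String) (m : Int) (v : String) : minStep gt m v ≤ m := by
  unfold minStep; cases PySem.List.index? gt v <;> simp

theorem minStep_nonneg (gt : List String) (m : Int) (v : String) (h : 0 ≤ m) : 0 ≤ minStep gt m v := by
  unfold minStep; cases PySem.List.index? gt v <;> simp <;> omega

theorem jmin_le (gt : List String) (vars : List String) : ∀ j : Int, jmin gt vars j ≤ j := by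
  induction vars with
  | nil => intro j; simp [jmin]
  | cons v vs ih =>
    intro j
    have h1 := minStep_le gt j v
    have h2 := ih (minStep gt j v)
    simp only [jmin, List.foldl_cons] at *
    omega

theorem jmin_nonneg (gt : List String) (vars : List String) : ∀ j : Int, 0 ≤ j → 0 ≤ jmin gt vars j := by
  induction vars with
  | nil => intro j h; simpa [jmin]
  | cons v vs ih =>
    intro j h
    have := minStep_nonneg gt j v h
    simpa [jmin, List.foldl_cons] using ih _ this

theorem jmin_le_of_mem (gt : List String) (vars : List String) {v : String} {k : ℕ}
    (hv : v ∈ vars) (hk : PySem.List.index? gt v = some k) : ∀ j : Int, jmin gt vars j ≤ (k : Int) := by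
  induction vars with
  | nil => cases hv
  | cons w ws ih =>
    intro j
    rcases List.mem_cons.mp hv with h | h
    · subst h
      have h1 : minStep gt j v ≤ (k : Int) := by
        simp only [minStep, hk]; omega
      have h2 := jmin_le gt ws (minStep gt j v)
      simp only [jmin, List.foldl_cons] at *
      omega
    · simpa [jmin, List.foldl_cons] using ih h (minStep gt j w)

-- A's fold computes the minimum matched index (capped by the initial bound)
theorem foldA (gt : List String) (vars : List String) : ∀ (o : Option String) (j : Int),
    vars.foldl (aStep gt) (o, j) =
      if jmin gt vars j < j then (gt[(jmin gt vars j).toNat]?, jmin gt vars j) else (o, j) := by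
  induction vars with
  | nil => intro o j; simp [jmin]
  | cons v vs ih =>
    intro o j
    rw [List.foldl_cons, show jmin gt (v :: vs) j = jmin gt vs (minStep gt j v) from rfl]
    cases hk : PySem.List.index? gt v with
    | none =>
      have hnc : gt.contains v = false := by
        have := (PySem.List.index?_eq_none_iff gt v).mp hk
        simpa using this
      have hstep : aStep gt (o, j) v = (o, j) := by
        simp only [aStep, hnc, hk]; simp
      have hms : minStep gt j v = j := by simp only [minStep, hk]
      rw [hstep, hms]; exact ih o j
    | some k =>
      obtain ⟨hklen0, hgk0, -⟩ := PySem.List.getElem_of_index?_eq_some hk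
      have hc : gt.contains v = true := by
        have : v ∈ gt := hgk0 ▸ List.getElem_mem hklen0
        simpa using this
      have hms : minStep gt j v = min j (k : Int) := by simp only [minStep, hk]
      obtain ⟨hklen, hgk, -⟩ := PySem.List.getElem_of_index?_eq_some hk
      by_cases hlt : (k : Int) < j
      · have hstep : aStep gt (o, j) v = (some v, (k : Int)) := by
          simp only [aStep, hc, hk]
          simp [hlt]
        rw [hstep, hms]
        have hminj : min j (k : Int) = (k : Int) := by omega
        rw [hminj]
        rw [ih (some v) (k : Int)]
        have hle := jmin_le gt vs (k : Int)
        by_cases h2 : jmin gt vs (k : Int) < (k : Int)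
        · rw [if_pos h2, if_pos (show jmin gt vs (k : Int) < j by omega)]
        · have heq : jmin gt vs (k : Int) = (k : Int) := by omega
          rw [heq, if_neg (lt_irrefl _), if_pos hlt]
          have hget : gt[((k : Int)).toNat]? = some v := by
            simp [List.getElem?_eq_getElem hklen, hgk]
          rw [hget]
      · have hstep : aStep gt (o, j) v = (o, j) := by
          simp only [aStep, hc, hk]
          simp [hlt]
        have hminj : min j (k : Int) = j := by omega
        rw [hstep, hms, hminj]; exact ih o j

theorem jmin_nil_gt (vars : List String) : ∀ j : Int, jmin [] vars j = j := by
  induction vars with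
  | nil => intro j; simp [jmin]
  | cons v vs ih => intro j; simpa [jmin, List.foldl_cons, minStep, PySem.List.index?] using ih j

theorem jmin_shift (g : String) (gs : List String) (vars : List String) :
    ∀ j : Int, vars.contains g = false → 1 ≤ j →
      jmin (g :: gs) vars j = jmin gs vars (j - 1) + 1 := by
  induction vars with
  | nil => intro j _ _; simp [jmin]
  | cons v vs ih =>
    intro j hg hj
    have hgv : g ≠ v := by
      intro h; subst h; simp at hg
    have hgs : vs.contains g = false := by
      simp at hg ⊢; tauto
    have hidx : PySem.List.index? (g :: gs) v = (PySem.List.index? gs v).map (· + 1) :=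
      PySem.List.index?_cons_of_ne gs hgv
    simp only [jmin, List.foldl_cons]
    cases hk : PySem.List.index? gs v with
    | none =>
      have h1 : minStep (g :: gs) j v = j := by
        simp only [minStep, hidx, hk, Option.map_none]
      have h2 : minStep gs (j - 1) v = j - 1 := by simp only [minStep, hk]
      rw [h1, h2]; exact ih j hgs hj
    | some k =>
      have h1 : minStep (g :: gs) j v = min j ((k : Int) + 1) := by
        simp only [minStep, hidx, hk, Option.map_some]
        push_cast; ring_nf
      have h2 : minStep gs (j - 1) v = min (j - 1) (k : Int) := by simp only [minStep, hk]
      rw [h1, h2]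
      have he : min j ((k : Int) + 1) = min (j - 1) (k : Int) + 1 := by omega
      have hge : 1 ≤ min j ((k : Int) + 1) := by omega
      rw [he]
      have := ih (min (j - 1) (k : Int) + 1) hgs (by omega)
      simpa using this

theorem jmin_eq (vars : List String) : ∀ (gt : List String) (j : Int), 0 ≤ j →
    jmin gt vars j =
      match gt.findIdx? (fun g => vars.contains g) with
      | some i => min j (i : Int)
      | none => j := by
  intro gt
  induction gt with
  | nil => intro j _; simp [jmin_nil_gt]
  | cons g gs ih =>
    intro j hj
    by_cases hg : vars.contains g = true
    · have hf : (g :: gs).findIdx? (fun x => vars.contains x) = some 0 := by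
        rw [List.findIdx?_cons, if_pos hg]
      rw [hf]
      have hmem : g ∈ vars := List.mem_of_elem_eq_true hg
      have hidx : PySem.List.index? (g :: gs) g = some 0 := PySem.List.index?_cons_self g gs
      have h1 := jmin_le_of_mem (g :: gs) vars hmem hidx j
      have h2 := jmin_nonneg (g :: gs) vars j hj
      show jmin (g :: gs) vars j = min j ((0 : ℕ) : Int)
      push_cast
      omega
    · have hg' : vars.contains g = false := by simpa using hg
      have hf : (g :: gs).findIdx? (fun x => vars.contains x) =
          (gs.findIdx? (fun x => vars.contains x)).map (· + 1) := by
        rw [List.findIdx?_cons, if_neg hg]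
      rw [hf]
      by_cases hj1 : 1 ≤ j
      · rw [jmin_shift g gs vars j hg' hj1, ih (j - 1) (by omega)]
        cases gs.findIdx? (fun x => vars.contains x) with
        | none => show (j - 1) + 1 = j; omega
        | some i =>
          show min (j - 1) (i : Int) + 1 = min j (((i + 1 : ℕ)) : Int)
          push_cast; omega
      · have hj0 : j = 0 := by omega
        subst hj0
        have h1 := jmin_le (g :: gs) vars 0
        have h2 := jmin_nonneg (g :: gs) vars 0 le_rfl
        cases gs.findIdx? (fun x => vars.contains x) with
        | none => show jmin (g :: gs) vars 0 = (0 : Int); omega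
        | some i =>
          show jmin (g :: gs) vars 0 = min 0 (((i + 1 : ℕ)) : Int)
          have hm : min (0 : Int) (((i + 1 : ℕ)) : Int) = 0 := by push_cast; omega
          rw [hm]; omega

theorem altGo_eq (present : PySem.Set String) (gs : List String) : ∀ k : Int,
    altGo present gs k =
      match gs.findIdx? (fun g => PySem.Set.contains present g) with
      | some i => (gs[i]?, k + (i : Int))
      | none => (none, 10000) := by
  induction gs with
  | nil => intro k; simp [altGo]
  | cons g rest ih =>
    intro k
    rw [List.findIdx?_cons]
    by_cases hg : PySem.Set.contains present g = true
    · rw [if_pos hg]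
      show (if PySem.Set.contains present g then (some g, k) else altGo present rest (k + 1)) =
        ((g :: rest)[(0 : ℕ)]?, k + ((0 : ℕ) : Int))
      rw [if_pos hg]
      simp
    · rw [if_neg hg]
      show (if PySem.Set.contains present g then (some g, k) else altGo present rest (k + 1)) = _
      rw [if_neg hg, ih (k + 1)]
      cases hrest : rest.findIdx? (fun g => PySem.Set.contains present g) with
      | none => rfl
      | some i =>
        show ((rest[i]?, k + 1 + (i : Int)) : Option String × Int) =
          ((g :: rest)[i + 1]?, k + ((i + 1 : ℕ) : Int))
        rw [List.getElem?_cons_succ]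
        push_cast
        ring_nf

theorem contains_ofList (xs : List String) (g : String) :
    PySem.Set.contains (PySem.Set.ofList xs) g = xs.contains g := by
  show List.contains (PySem.Set.ofList xs) g = xs.contains g
  by_cases h : g ∈ xs
  · have h1 : g ∈ PySem.Set.ofList xs := (PySem.Set.mem_ofList xs g).mpr h
    rw [List.contains_iff_mem.mpr h1, List.contains_iff_mem.mpr h]
  · have h1 : g ∉ PySem.Set.ofList xs := fun hc => h ((PySem.Set.mem_ofList xs g).mp hc)
    have e1 : List.contains (PySem.Set.ofList xs) g = false := by simpa using h1
    have e2 : xs.contains g = false := by simpa using h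
    rw [e1, e2]

theorem A_char (all_var gt : List String) :
    get_cluster_head all_var gt =
      match gt.findIdx? (fun g => all_var.contains g) with
      | some i => if (i : Int) < 10000 then (gt[i]?, (i : Int)) else (none, 10000)
      | none => (none, 10000) := by
  unfold get_cluster_head
  rw [foldA gt all_var none 10000]
  have hj := jmin_eq all_var gt 10000 (by norm_num)
  rw [show (jmin gt all_var 10000) = _ from hj]
  cases h : gt.findIdx? (fun g => all_var.contains g) with
  | none => simp
  | some i =>
    by_cases hi : (i : Int) < 10000
    · have hmin : min (10000 : Int) (i : Int) = (i : Int) := by omega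
      simp only [hmin, hi, if_pos, Int.toNat_natCast]
    · have hmin : min (10000 : Int) (i : Int) = 10000 := by omega
      simp [hmin, hi]

theorem findIdx?_take (p : String → Bool) (l : List String) : ∀ n : ℕ,
    (l.take n).findIdx? p =
      match l.findIdx? p with
      | some i => if i < n then some i else none
      | none => none := by
  induction l with
  | nil => intro n; cases n <;> simp
  | cons g gs ih =>
    intro n
    cases n with
    | zero =>
      cases (g :: gs).findIdx? p <;> simp
    | succ m =>
      rw [List.take_succ_cons, List.findIdx?_cons, List.findIdx?_cons]
      by_cases hp : p g = true
      · simp [hp]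
      · rw [if_neg hp, if_neg hp, ih m]
        cases hgs : gs.findIdx? p with
        | none => rfl
        | some i =>
          show Option.map (fun i => i + 1) (if i < m then some i else none) =
            if i + 1 < m + 1 then some (i + 1) else none
          by_cases hi : i < m
          · rw [if_pos hi, if_pos (show i + 1 < m + 1 by omega)]; rfl
          · rw [if_neg hi, if_neg (show ¬ i + 1 < m + 1 by omega)]; rfl

theorem B_char (all_var gt : List String) :
    get_cluster_head_alt all_var gt =
      match (gt.take 10000).findIdx? (fun g => all_var.contains g) with
      | some i => ((gt.take 10000)[i]?, (i : Int))
      | none => (none, 10000) := by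
  unfold get_cluster_head_alt
  have hslice : PySem.List.slice gt none (some (10000 : Int)) = gt.take 10000 := by
    simpa using PySem.List.slice_to_natCast (xs := gt) (b := 10000)
  rw [hslice, altGo_eq (PySem.Set.ofList all_var) (gt.take 10000) 0]
  have hp : (fun g => PySem.Set.contains (PySem.Set.ofList all_var) g) = (fun g => all_var.contains g) := by
    funext g; exact contains_ofList all_var g
  rw [hp]
  cases (gt.take 10000).findIdx? (fun g => all_var.contains g) with
  | none => rfl
  | some i => simp

-- ===== VERDICT (by name: the statement is the Claim_ definition above) =====
theorem get_cluster_head_spec : Claim_equal_get_cluster_head := by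
  intro all_var gt _
  show get_cluster_head all_var gt = get_cluster_head_alt all_var gt
  rw [A_char, B_char, findIdx?_take]
  cases h : gt.findIdx? (fun g => all_var.contains g) with
  | none => rfl
  | some i =>
    show (if (i : Int) < 10000 then (gt[i]?, (i : Int)) else (none, 10000)) =
      (match (if i < 10000 then some i else none : Option ℕ) with
       | some i => ((gt.take 10000)[i]?, (i : Int))
       | none => (none, 10000))
    by_cases hi : i < 10000
    · have hc : (i : Int) < 10000 := by exact_mod_cast hi
      rw [if_pos hi, if_pos hc]
      show (gt[i]?, (i : Int)) = ((gt.take 10000)[i]?, (i : Int))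
      rw [List.getElem?_take_of_lt hi]
    · have hc : ¬ ((i : Int) < 10000) := by exact_mod_cast hi
      rw [if_neg hi, if_neg hc]
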